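-- pv_equiv track=rewrite | github.com/bononlouis-del/Les-ICPE-en-r-serve-naturelle-nationale | scripts/build_metadata_samples.py | is_boolean_like
-- ===== SOURCE A (Python) =====
-- BOOLEAN_VALUES = {"TRUE", "FALSE", "True", "False", "true", "false", "0", "1"}
--
-- def is_boolean_like(values: list[str]) -> bool:
--     """True if every non-empty value is in BOOLEAN_VALUES."""
--     saw_one = False
--     for v in values:
--         if not v:
--             continue
--         if v not in BOOLEAN_VALUES:
--             return False
--         saw_one = True
--     return saw_one
-- ===== SOURCE B (Python) =====
-- BOOLEAN_VALUES = {"TRUE", "FALSE", "True", "False", "true", "false", "0", "1"}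
--
-- def is_boolean_like(values: list[str]) -> bool:
--     """True if every non-empty value is in BOOLEAN_VALUES."""
--     nonempty = sum(1 for v in values if v)
--     matches = sum(1 for v in values if v in BOOLEAN_VALUES)
--     return nonempty > 0 and nonempty == matches
-- ===== Notes on version B (the rewrite author's own statement) =====
-- stated objective: alternative
-- what changed: Replaces the early-return membership loop with a saw_one flag by an arithmetic formulation: count the non-empty values and count the BOOLEAN_VALUES matches in two staged passes, then compare the two counts (correct because the empty string is never in BOOLEAN_VALUES, so matches == nonempty iff every non-empty value matches).
import Mathlib
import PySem

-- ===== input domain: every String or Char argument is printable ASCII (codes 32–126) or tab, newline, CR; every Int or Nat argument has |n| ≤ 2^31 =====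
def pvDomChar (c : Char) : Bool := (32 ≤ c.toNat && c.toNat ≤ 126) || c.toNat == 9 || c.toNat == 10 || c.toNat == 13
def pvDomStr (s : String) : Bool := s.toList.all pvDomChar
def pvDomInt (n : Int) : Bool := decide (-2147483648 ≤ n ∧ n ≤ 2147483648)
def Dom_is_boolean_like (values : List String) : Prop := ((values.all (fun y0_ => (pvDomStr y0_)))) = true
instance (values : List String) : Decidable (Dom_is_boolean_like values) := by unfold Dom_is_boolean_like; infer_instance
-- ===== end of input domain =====

-- B replaces A's early-return loop with a saw_one flag by two staged counting passes
-- (count non-empty values, count BOOLEAN_VALUES nmatch) compared arithmetically (objective: alternative).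

-- ===== PORT A =====
def pvBooleanValues : PySem.Set String :=
  PySem.Set.ofList ["TRUE", "FALSE", "True", "False", "true", "false", "0", "1"]

def pvLoopA : List String → Bool → Bool
  | [], saw_one => saw_one
  | v :: vs, saw_one =>
      if v == "" then pvLoopA vs saw_one
      else if !(PySem.Set.contains pvBooleanValues v) then false
      else pvLoopA vs true

def is_boolean_like (values : List String) : Bool := pvLoopA values false

-- ===== PORT B =====
-- sum(1 for v in values if p(v)) as a left fold with a counter
def pvCountIf (p : String → Bool) (values : List String) : Nat :=
  values.foldl (fun acc v => if p v then acc + 1 else acc) 0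

def is_boolean_like_alt (values : List String) : Bool :=
  let nonempty := pvCountIf (fun v => v != "") values
  let nmatch := pvCountIf (fun v => PySem.Set.contains pvBooleanValues v) values
  nonempty > 0 && nonempty == nmatch

-- ===== PRECONDITION & SPEC =====
def Spec_is_boolean_like (values : List String) (out : Bool) : Prop := out = is_boolean_like_alt values
instance (values : List String) (out : Bool) : Decidable (Spec_is_boolean_like values out) := by unfold Spec_is_boolean_like; infer_instance

-- ===== CLAIM (what is proved, stated in full; the proofs are below) =====
def Claim_equal_is_boolean_like : Prop := ∀ (values : List String), Dom_is_boolean_like values → Spec_is_boolean_like values (is_boolean_like values)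

-- ===== LEMMAS AND PROOFS =====

lemma pvCountIf_go (p : String → Bool) (vs : List String) (n : Nat) :
    vs.foldl (fun acc v => if p v then acc + 1 else acc) n = n + vs.countP p := by
  induction vs generalizing n with
  | nil => simp
  | cons v vs ih => by_cases h : p v <;> simp [h, ih, List.countP_cons] <;> omega

lemma pvCountIf_eq_countP (p : String → Bool) (values : List String) :
    pvCountIf p values = values.countP p := by
  simpa using pvCountIf_go p values 0

lemma nmatch_le_nonempty (vs : List String) :
    vs.countP (fun v => decide (v ∈ pvBooleanValues)) ≤ vs.countP (fun v => v != "") := by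
  apply List.countP_mono_left
  intro v _ hv
  rw [decide_eq_true_iff] at hv
  rcases (by simpa [pvBooleanValues, PySem.Set.mem_ofList] using hv) with h|h|h|h|h|h|h|h <;>
    subst h <;> decide

lemma pvLoopA_char (vs : List String) (saw : Bool) :
    pvLoopA vs saw =
      ((saw || decide (0 < vs.countP (fun v => v != ""))) &&
        (vs.countP (fun v => PySem.Set.contains pvBooleanValues v) ==
          vs.countP (fun v => v != ""))) := by
  induction vs generalizing saw with
  | nil => simp [pvLoopA]
  | cons v vs ih =>
      by_cases hv : v = ""
      · subst hv
        have hm : ¬ ("" ∈ pvBooleanValues) := by decide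
        simp [pvLoopA, List.countP_cons, ih, hm]
      · by_cases hb : PySem.Set.contains pvBooleanValues v = true
        · have hmem : v ∈ pvBooleanValues := by
            simpa [PySem.Set.contains_iff] using hb
          rw [Bool.eq_iff_iff]
          simp [pvLoopA, hv, hb, List.countP_cons, ih, hmem]
        · have hle := nmatch_le_nonempty vs
          have hmem : ¬ v ∈ pvBooleanValues := by
            simpa [PySem.Set.contains_iff] using hb
          rw [Bool.eq_iff_iff]
          simp [pvLoopA, hv, hb, List.countP_cons, hmem]
          omega

-- ===== VERDICT (by name: the statement is the Claim_ definition above) =====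
theorem is_boolean_like_spec : Claim_equal_is_boolean_like := by
  intro values _
  show is_boolean_like values = is_boolean_like_alt values
  rw [Bool.eq_iff_iff]
  simp [is_boolean_like, is_boolean_like_alt, pvLoopA_char, pvCountIf_eq_countP]
  omega
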